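-- pv_equiv track=rewrite | github.com/AbdiNi/NougatBOT | nougatbot.py | check
-- ===== SOURCE A (Python) =====
-- def check(liste, words):
--     res = []
--     indexrep = -1
--     for index,substring in enumerate(liste):
--         k = [ w.lower() for w in words if w.lower() in substring.lower() ]
--         if (len(k) == len(words) ):
--             res.append(substring)
--             indexrep=index
--     return indexrep
-- ===== SOURCE B (Python) =====
-- def check(liste, words):
--     for index in range(len(liste) - 1, -1, -1):
--         if all(w.lower() in liste[index].lower() for w in words):
--             return index
--     return -1
-- ===== Notes on version B (the rewrite author's own statement) =====
-- stated objective: simpler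
-- what changed: B scans the list backward and returns the first matching index immediately, instead of A's forward scan that keeps overwriting a result variable and builds an unused res list.
import Mathlib
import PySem

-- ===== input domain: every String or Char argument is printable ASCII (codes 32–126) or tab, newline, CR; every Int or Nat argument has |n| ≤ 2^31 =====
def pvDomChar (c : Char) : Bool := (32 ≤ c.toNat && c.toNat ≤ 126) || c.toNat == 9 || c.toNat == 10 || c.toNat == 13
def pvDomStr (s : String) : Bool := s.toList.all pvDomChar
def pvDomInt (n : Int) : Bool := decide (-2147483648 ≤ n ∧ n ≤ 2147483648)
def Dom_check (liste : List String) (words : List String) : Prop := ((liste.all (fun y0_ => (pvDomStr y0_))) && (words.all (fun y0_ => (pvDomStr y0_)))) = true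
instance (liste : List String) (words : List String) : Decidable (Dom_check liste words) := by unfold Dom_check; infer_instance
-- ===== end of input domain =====

-- B scans backward and returns the first matching index immediately; simpler than A's forward scan with an accumulator. No speed claim.
-- ===== PORT A =====
def check (liste : List String) (words : List String) : Int :=
  (((PySem.List.enumerate liste).foldl
      (fun (st : List String × Int) (p : Int × String) =>
        let k := (words.filter
            (fun w => PySem.Str.isIn (PySem.Str.lower w) (PySem.Str.lower p.2))).map
            (fun w => PySem.Str.lower w)
        if k.length = words.length then (st.1 ++ [p.2], p.1) else st)
      ([], -1)) : List String × Int).2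

-- ===== PORT B =====
def checkAllIn (words : List String) (s : String) : Bool :=
  words.all (fun w => PySem.Str.isIn (PySem.Str.lower w) (PySem.Str.lower s))

def checkAltGo (words : List String) : List String → Int → Int
  | [], _ => -1
  | s :: rest, i => if checkAllIn words s then i else checkAltGo words rest (i - 1)

def check_alt (liste : List String) (words : List String) : Int :=
  checkAltGo words liste.reverse ((liste.length : Int) - 1)

-- ===== PRECONDITION & SPEC =====
def Spec_check (liste : List String) (words : List String) (out : Int) : Prop := out = check_alt liste words
instance (liste : List String) (words : List String) (out : Int) : Decidable (Spec_check liste words out) := by unfold Spec_check; infer_instance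

-- ===== CLAIM (what is proved, stated in full; the proofs are below) =====
def Claim_equal_check : Prop := ∀ (liste : List String) (words : List String), Dom_check liste words → Spec_check liste words (check liste words)

-- ===== LEMMAS AND PROOFS =====

-- ===== VERDICT (by name: the statement is the Claim_ definition above) =====
-- A's per-element test "len(filter) == len(words)" holds iff every word matches
theorem cond_iff (words : List String) (s : String) :
    (((words.filter (fun w => PySem.Str.isIn (PySem.Str.lower w) (PySem.Str.lower s))).map
        (fun w => PySem.Str.lower w)).length = words.length)
      ↔ checkAllIn words s = true := by
  simp [checkAllIn, List.length_map, List.length_filter_eq_length_iff, List.all_eq_true]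

theorem main_eq (words : List String) (liste : List String) :
    check liste words = check_alt liste words := by
  induction liste using List.reverseRecOn with
  | nil => rfl
  | append_singleton l x ih =>
      have hA : check (l ++ [x]) words =
          (if (((words.filter (fun w => PySem.Str.isIn (PySem.Str.lower w) (PySem.Str.lower x))).map
              (fun w => PySem.Str.lower w)).length = words.length) then (l.length : Int)
           else check l words) := by
        simp only [check, PySem.List.enumerate_append, PySem.List.enumerate_cons,
          PySem.List.enumerate_nil, List.foldl_append, List.foldl_cons, List.foldl_nil]
        split_ifs with h
        · simp
        · rfl
      have hB : check_alt (l ++ [x]) words =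
          (if checkAllIn words x then (l.length : Int) else check_alt l words) := by
        simp only [check_alt, List.reverse_append, List.reverse_singleton, List.singleton_append,
          List.length_append, List.length_singleton, checkAltGo]
        have : ((l.length + 1 : Nat) : Int) - 1 = (l.length : Int) := by push_cast; ring
        rw [this]
      rw [hA, hB, ih]
      by_cases h : checkAllIn words x = true
      · rw [if_pos ((cond_iff words x).mpr h), if_pos h]
      · rw [if_neg (fun hc => h ((cond_iff words x).mp hc)), if_neg h]

-- ===== VERDICT =====
theorem check_spec : Claim_equal_check := by
  intro liste words _
  unfold Spec_check
  exact main_eq words liste
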